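-- pv_equiv track=rewrite | github.com/ritakalach/pramp-solutions | code/time_planner.py | meeting_planner
-- ===== SOURCE A (Python) =====
-- def meeting_planner(slotsA, slotsB, dur):
--   A_idx, B_idx = 0, 0
--   m, n = len(slotsA), len(slotsB)
--
--   while A_idx < m and B_idx < n:
--     A_start, A_end = slotsA[A_idx]
--     B_start, B_end = slotsB[B_idx]
--
--     start = max(A_start, B_start)
--     end = min(A_end, B_end)
--     overlap = end - start
--     if overlap >= dur:
--       return [start, start + dur]
--
--     if A_end < B_end:
--       A_idx += 1
--     else:
--       B_idx += 1
--
--   return []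
-- ===== SOURCE B (Python) =====
-- def _overlap_chain(A, B):
--     # chain of candidate overlap windows along the merge-by-end path
--     if not A or not B:
--         return []
--     (a0, a1), (b0, b1) = A[0], B[0]
--     head = (max(a0, b0), min(a1, b1))
--     if a1 < b1:
--         return [head] + _overlap_chain(A[1:], B)
--     else:
--         return [head] + _overlap_chain(A, B[1:])
--
-- def meeting_planner(slotsA, slotsB, dur):
--     fit = next((w for w in _overlap_chain(slotsA, slotsB) if w[1] - w[0] >= dur), None)
--     return [] if fit is None else [fit[0], fit[0] + dur]
-- ===== Notes on version B (the rewrite author's own statement) =====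
-- stated objective: alternative
-- what changed: Replaces the index-based while loop with early return by a two-phase pipeline: a recursive helper that consumes the two lists to build the whole chain of candidate overlap windows along the merge-by-end path, then a first-match scan over that chain.
import Mathlib
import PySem

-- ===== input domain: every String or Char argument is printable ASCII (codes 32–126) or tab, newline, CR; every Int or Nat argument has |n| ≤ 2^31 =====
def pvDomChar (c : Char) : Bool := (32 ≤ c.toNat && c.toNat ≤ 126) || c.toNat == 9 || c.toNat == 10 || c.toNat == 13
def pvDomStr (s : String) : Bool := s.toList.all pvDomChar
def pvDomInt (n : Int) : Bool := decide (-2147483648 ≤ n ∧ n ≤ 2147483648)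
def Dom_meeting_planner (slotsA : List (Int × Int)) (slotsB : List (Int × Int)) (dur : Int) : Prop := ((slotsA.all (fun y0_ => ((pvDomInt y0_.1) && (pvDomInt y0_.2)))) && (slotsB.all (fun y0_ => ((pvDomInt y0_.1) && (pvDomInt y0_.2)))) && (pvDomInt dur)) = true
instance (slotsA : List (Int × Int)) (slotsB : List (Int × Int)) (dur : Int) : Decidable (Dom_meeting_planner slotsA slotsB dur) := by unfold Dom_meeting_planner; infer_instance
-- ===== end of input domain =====

-- B replaces A's index-based while loop (early return) by a two-phase pipeline:
-- build the whole chain of candidate overlap windows recursively, then take the first fit.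
-- ===== PORT A =====
-- the while loop of A: indices A_idx, B_idx advance until one list is exhausted
def meeting_planner_loop (slotsA : List (Int × Int)) (slotsB : List (Int × Int)) (dur : Int) (A_idx B_idx : Nat) : List Int :=
  if h : A_idx < slotsA.length ∧ B_idx < slotsB.length then
    let (A_start, A_end) := slotsA[A_idx]
    let (B_start, B_end) := slotsB[B_idx]
    let start := max A_start B_start
    let «end» := min A_end B_end
    let overlap := «end» - start
    if overlap ≥ dur then [start, start + dur]
    else if A_end < B_end then meeting_planner_loop slotsA slotsB dur (A_idx + 1) B_idx
    else meeting_planner_loop slotsA slotsB dur A_idx (B_idx + 1)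
  else []
termination_by (slotsA.length - A_idx) + (slotsB.length - B_idx)
decreasing_by all_goals omega

def meeting_planner (slotsA : List (Int × Int)) (slotsB : List (Int × Int)) (dur : Int) : List Int :=
  meeting_planner_loop slotsA slotsB dur 0 0

-- ===== PORT B =====
-- chain of candidate overlap windows along the merge-by-end path
def overlapChain : List (Int × Int) → List (Int × Int) → List (Int × Int)
  | [], _ => []
  | _ :: _, [] => []
  | (a0, a1) :: as_, (b0, b1) :: bs =>
    (max a0 b0, min a1 b1) ::
      (if a1 < b1 then overlapChain as_ ((b0, b1) :: bs)
       else overlapChain ((a0, a1) :: as_) bs)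
termination_by A B => A.length + B.length

def meeting_planner_alt (slotsA : List (Int × Int)) (slotsB : List (Int × Int)) (dur : Int) : List Int :=
  match (overlapChain slotsA slotsB).find? (fun w => w.2 - w.1 ≥ dur) with
  | none => []
  | some fit => [fit.1, fit.1 + dur]

-- ===== PRECONDITION & SPEC =====
def Spec_meeting_planner (slotsA : List (Int × Int)) (slotsB : List (Int × Int)) (dur : Int) (out : List Int) : Prop := out = meeting_planner_alt slotsA slotsB dur
instance (slotsA : List (Int × Int)) (slotsB : List (Int × Int)) (dur : Int) (out : List Int) : Decidable (Spec_meeting_planner slotsA slotsB dur out) := by unfold Spec_meeting_planner; infer_instance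

-- ===== CLAIM (what is proved, stated in full; the proofs are below) =====
def Claim_equal_meeting_planner : Prop := ∀ (slotsA : List (Int × Int)) (slotsB : List (Int × Int)) (dur : Int), Dom_meeting_planner slotsA slotsB dur → Spec_meeting_planner slotsA slotsB dur (meeting_planner slotsA slotsB dur)

-- ===== LEMMAS AND PROOFS =====

-- ===== VERDICT (by name: the statement is the Claim_ definition above) =====
-- loop at (i, j) computes B's pipeline on the remaining suffixes
theorem loop_eq_chain (slotsA slotsB : List (Int × Int)) (dur : Int) (i j : Nat) :
    meeting_planner_loop slotsA slotsB dur i j =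
      (match ((overlapChain (slotsA.drop i) (slotsB.drop j)).find?
                (fun w => w.2 - w.1 ≥ dur)) with
       | none => []
       | some fit => [fit.1, fit.1 + dur]) := by
  induction i, j using meeting_planner_loop.induct slotsA slotsB dur with
  | case1 i j h aS aE hA bS bE hB st en ov hov =>
      have hov' : dur ≤ min aE bE - max aS bS := hov
      rw [meeting_planner_loop, dif_pos h]
      rw [List.drop_eq_getElem_cons h.1, List.drop_eq_getElem_cons h.2, hA, hB]
      simp [overlapChain, hov']
  | case2 i j h aS aE hA bS bE hB st en ov hov hlt ih =>
      have hov' : ¬ dur ≤ min aE bE - max aS bS := hov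
      have hd : (decide (dur ≤ min aE bE - max aS bS)) = false := by simpa using hov'
      rw [meeting_planner_loop, dif_pos h]
      rw [List.drop_eq_getElem_cons h.1, List.drop_eq_getElem_cons h.2, hA, hB]
      simp only [hA, hB]
      rw [if_neg hov', if_pos hlt, ih]
      rw [List.drop_eq_getElem_cons h.2, hB]
      simp [overlapChain, hd, hlt]
  | case3 i j h aS aE hA bS bE hB st en ov hov hlt ih =>
      have hov' : ¬ dur ≤ min aE bE - max aS bS := hov
      have hd : (decide (dur ≤ min aE bE - max aS bS)) = false := by simpa using hov'
      rw [meeting_planner_loop, dif_pos h]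
      rw [List.drop_eq_getElem_cons h.1, List.drop_eq_getElem_cons h.2, hA, hB]
      simp only [hA, hB]
      rw [if_neg hov', if_neg hlt, ih]
      rw [List.drop_eq_getElem_cons h.1, hA]
      simp [overlapChain, hd, hlt]
  | case4 i j h =>
      rw [meeting_planner_loop, dif_neg h]
      rcases Nat.lt_or_ge i slotsA.length with hi | hi
      · have hj : slotsB.length ≤ j := by omega
        rw [List.drop_eq_nil_of_le hj]
        rw [List.drop_eq_getElem_cons hi]
        rcases hp : slotsA[i] with ⟨a0, a1⟩
        simp [overlapChain]
      · rw [List.drop_eq_nil_of_le hi]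
        simp [overlapChain]

theorem meeting_planner_spec : Claim_equal_meeting_planner := by
  intro slotsA slotsB dur _
  unfold Spec_meeting_planner meeting_planner meeting_planner_alt
  simpa using loop_eq_chain slotsA slotsB dur 0 0
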